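-- pv_equiv track=rewrite | github.com/collinsakenga/codewars_solutions | 6 kyu/Total Primes.py | get_total_primes
-- ===== SOURCE A (Python) =====
-- from itertools import product
--
-- def get_total_primes(a, b):
--     total=0 if a>5 else 1 if a>2 else 2
--     for i in range(len(str(a)), len(str(b))+1):
--         for j in product("2357", repeat=i):
--             prime=int("".join(j))
--             if prime%10==2 or prime%10==5 or prime<a or prime>=b:
--                 continue
--             if is_prime(prime):
--                 total+=1
--     return total
--
-- def is_prime(n):
--     for i in range(2, int(n**0.5)+1):
--         if n%i==0:
--             return False
--     return True
-- ===== SOURCE B (Python) =====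
-- def get_total_primes(a, b):
--     # Prune-as-you-go DFS over integer candidates (no itertools.product, no
--     # string round-trips): a branch is abandoned as soon as its prefix reaches b.
--     # Primality is decided by dividing only by a prime table shared across all
--     # candidates, precomputed once up to isqrt(b - 1).
--     limit = _isqrt(b - 1)
--     primes = [p for p in range(2, limit + 1)
--               if all(p % q for q in range(2, _isqrt(p) + 1))]
--
--     def good(n):
--         if n < a or not (n in (2, 5) or n % 10 in (3, 7)):
--             return False
--         for p in primes:
--             if p * p > n:
--                 break
--             if n % p == 0:
--                 return False
--         return True
--
--     def dfs(c):
--         if c >= b: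
--             return 0
--         return (1 if good(c) else 0) + sum(dfs(10 * c + d) for d in (2, 3, 5, 7))
--
--     return dfs(2) + dfs(3) + dfs(5) + dfs(7)
--
-- def _isqrt(n):
--     r = 0
--     while (r + 1) * (r + 1) <= n:
--         r += 1
--     return r
-- ===== Notes on version B (the rewrite author's own statement) =====
-- stated objective: alternative
-- what changed: B replaces A's exhaustive itertools.product over digit strings and per-candidate trial division by every integer up to sqrt(n) with a pruned DFS over integer candidates (a branch is cut as soon as its prefix reaches b) and a prime table precomputed once up to isqrt(b-1), against which each surviving candidate is divided only by primes p with p*p <= n; 2 and 5 are counted naturally by the range test instead of A's hardcoded initial total.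
-- intended difference: For 0 <= a <= 5 and b <= 5, A's hardcoded initial total counts 2 (when a <= 2) and 5 (when a <= 5) even though they are not below b, so A returns an overcount (A(0,5)=3) while B returns the intended number of prime-digit primes in [a,b) (B(0,5)=2, namely 2 and 3). — e.g. on get_total_primes(0, 5): A returns 3, B returns 2
-- outside the precondition, e.g. on get_total_primes(-5, 100): A returns 6, B returns 8; on get_total_primes(-1, 10): A returns 2, B returns 4
import Mathlib
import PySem

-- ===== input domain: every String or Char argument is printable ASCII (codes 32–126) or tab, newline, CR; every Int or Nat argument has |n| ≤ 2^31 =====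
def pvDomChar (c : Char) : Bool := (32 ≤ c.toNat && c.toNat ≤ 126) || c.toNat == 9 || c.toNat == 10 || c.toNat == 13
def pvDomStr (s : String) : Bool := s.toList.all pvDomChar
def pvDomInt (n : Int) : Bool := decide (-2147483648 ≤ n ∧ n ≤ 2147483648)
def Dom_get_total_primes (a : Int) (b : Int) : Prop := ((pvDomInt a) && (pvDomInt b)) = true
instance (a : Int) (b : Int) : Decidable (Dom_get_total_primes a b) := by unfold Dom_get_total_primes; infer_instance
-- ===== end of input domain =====

-- B replaces A's exhaustive product over digit strings and per-candidate trial
-- division by a pruned DFS over integer candidates and one shared prime table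
-- (division only by primes p with p*p ≤ n).

-- ===== PORT A =====

-- int(n ** 0.5) of A, ported as the integer square root (kernel-transparent;
-- exact for the 0 ≤ n < 2^34 values A reaches).
def pvIsqrtGo : Nat → Nat → Nat → Nat → Nat
  | 0, lo, _, _ => lo
  | f + 1, lo, hi, n =>
    if hi ≤ lo + 1 then lo
    else
      let mid := (lo + hi) / 2
      if mid * mid ≤ n then pvIsqrtGo f mid hi n else pvIsqrtGo f lo mid n
def pvIsqrt (n : Nat) : Nat := pvIsqrtGo (n + 2) 0 (n + 2) n

-- int(s) for the strings reached here: "".join(j) with j a nonempty tuple of digit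
-- characters — int() on a pure digit string is this fold (exact on that domain).
def pvDigitsInt (cs : List Char) : Int :=
  cs.foldl (fun acc c => 10 * acc + ((c.toNat : Int) - 48)) 0

-- is_prime(n): trial division over range(2, int(n**0.5)+1)
def pvIsPrimeA (n : Int) : Bool :=
  (PySem.List.pyRange 2 ((pvIsqrt n.toNat : Int) + 1) 1).all
    (fun i => !(PySem.Int.mod n i == 0))

-- itertools.product("2357", repeat=k), in itertools order (last position fastest)
def pvProd : Nat → List (List Char)
  | 0 => [[]]
  | k + 1 => (pvProd k).flatMap (fun t => ['2', '3', '5', '7'].map (fun c => t ++ [c]))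

def get_total_primes (a : Int) (b : Int) : Int :=
  let total0 : Int := if 5 < a then 0 else if 2 < a then 1 else 2
  (PySem.List.pyRange (PySem.Str.len (PySem.Int.toStr a))
      (PySem.Str.len (PySem.Int.toStr b) + 1) 1).foldl
    (fun total i =>
      (pvProd i.toNat).foldl
        (fun total j =>
          let prime := pvDigitsInt j
          if PySem.Int.mod prime 10 = 2 ∨ PySem.Int.mod prime 10 = 5 ∨ prime < a ∨ b ≤ prime
          then total
          else if pvIsPrimeA prime then total + 1 else total)
        total)
    total0

-- ===== PORT B =====

-- _isqrt(n): r = 0; while (r+1)*(r+1) <= n: r += 1; return r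
-- (fuel n bounds the number of loop iterations, which is at most sqrt n ≤ n)
def pvIsqGo : Nat → Nat → Nat → Nat
  | 0, r, _ => r
  | f + 1, r, n => if (r + 1) * (r + 1) ≤ n then pvIsqGo f (r + 1) n else r
def pvIsqrtB (n : Int) : Int := (pvIsqGo n.toNat 0 n.toNat : Int)

-- the primes-table comprehension filter: all(p % q for q in range(2, _isqrt(p)+1))
def pvSmallPrime (p : Int) : Bool :=
  (PySem.List.pyRange 2 (pvIsqrtB p + 1) 1).all (fun q => !(PySem.Int.mod p q == 0))

-- primes = [p for p in range(2, limit + 1) if ...], limit = _isqrt(b - 1)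
def pvPrimes (b : Int) : List Int :=
  (PySem.List.pyRange 2 (pvIsqrtB (b - 1) + 1) 1).filter pvSmallPrime

-- the 'for p in primes: if p*p > n: break; if n % p == 0: return False' loop
def pvLoop (n : Int) : List Int → Bool
  | [] => true
  | p :: ps => if n < p * p then true else if PySem.Int.mod n p == 0 then false else pvLoop n ps

-- good(n)
def pvGood (a : Int) (primes : List Int) (n : Int) : Bool :=
  if n < a ∨ ¬(n = 2 ∨ n = 5 ∨ PySem.Int.mod n 10 = 3 ∨ PySem.Int.mod n 10 = 7) then false
  else pvLoop n primes

-- dfs(c): prune the whole branch as soon as c >= b (the fuel argument only makes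
-- the recursion structural; b.toNat + 1 exceeds the recursion depth, see pv_dfs_sum)
def pvDfs (a b : Int) (primes : List Int) : Nat → Int → Int
  | 0, _ => 0
  | f + 1, c =>
    if b ≤ c then 0
    else (if pvGood a primes c then 1 else 0) +
      (pvDfs a b primes f (10 * c + 2) + pvDfs a b primes f (10 * c + 3) +
       pvDfs a b primes f (10 * c + 5) + pvDfs a b primes f (10 * c + 7))

def get_total_primes_alt (a : Int) (b : Int) : Int :=
  let primes := pvPrimes b
  let fuel := b.toNat + 1
  pvDfs a b primes fuel 2 + pvDfs a b primes fuel 3 +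
    pvDfs a b primes fuel 5 + pvDfs a b primes fuel 7

-- ===== PRECONDITION & SPEC =====

-- Pre_ restricts to the kata's natural domain of a non-negative lower bound: for a
-- negative a, len(str(a)) counts the '-' sign as a digit, so A silently skips the
-- one-digit candidates 3 and 7; B simply counts the prime-digit primes in [a, b) there.
def Pre_get_total_primes (a : Int) (b : Int) : Prop := 0 ≤ a
instance (a : Int) (b : Int) : Decidable (Pre_get_total_primes a b) := by
  unfold Pre_get_total_primes; infer_instance

def pvWitness_get_total_primes : Int × Int := (6, 100)

-- On 0 ≤ a ≤ 5 and b ≤ 5, A's fixed initial total counts 2 (for a ≤ 2) and 5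
-- (for a ≤ 5) even when they are not below b, so A returns an overcount; B returns
-- the intended number of prime-digit primes in [a, b).
def D_get_total_primes (a : Int) (b : Int) : Prop := 0 ≤ a ∧ a ≤ 5 ∧ b ≤ 5
instance (a : Int) (b : Int) : Decidable (D_get_total_primes a b) := by
  unfold D_get_total_primes; infer_instance

def Spec_get_total_primes (a : Int) (b : Int) (out : Int) : Prop :=
  ¬ D_get_total_primes a b → out = get_total_primes_alt a b
instance (a : Int) (b : Int) (out : Int) : Decidable (Spec_get_total_primes a b out) := by
  unfold Spec_get_total_primes; infer_instance

def pvDiffWitness_get_total_primes : Int × Int := (0, 5)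
def pvDiffWitnessOut_get_total_primes : Int × Int := (3, 2)

-- ===== CLAIM (what is proved, stated in full; the proofs are below) =====
def Claim_unchanged_get_total_primes : Prop := ∀ (a : Int) (b : Int), Dom_get_total_primes a b → Pre_get_total_primes a b → Spec_get_total_primes a b (get_total_primes a b)
def Claim_changed_get_total_primes : Prop := Dom_get_total_primes (pvDiffWitness_get_total_primes.1) (pvDiffWitness_get_total_primes.2) ∧ Pre_get_total_primes (pvDiffWitness_get_total_primes.1) (pvDiffWitness_get_total_primes.2) ∧ D_get_total_primes (pvDiffWitness_get_total_primes.1) (pvDiffWitness_get_total_primes.2) ∧ get_total_primes (pvDiffWitness_get_total_primes.1) (pvDiffWitness_get_total_primes.2) = pvDiffWitnessOut_get_total_primes.1 ∧ get_total_primes_alt (pvDiffWitness_get_total_primes.1) (pvDiffWitness_get_total_primes.2) = pvDiffWitnessOut_get_total_primes.2 ∧ pvDiffWitnessOut_get_total_primes.1 ≠ pvDiffWitnessOut_get_total_primes.2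
def Claim_exact_get_total_primes : Prop := ∀ (a : Int) (b : Int), Dom_get_total_primes a b → Pre_get_total_primes a b → D_get_total_primes a b → get_total_primes a b ≠ get_total_primes_alt a b

-- ===== LEMMAS AND PROOFS =====

theorem pvIsqrtGo_eq (f : Nat) : ∀ (lo hi n : Nat), lo * lo ≤ n → n < hi * hi →
    hi - lo ≤ f + 1 → pvIsqrtGo f lo hi n = Nat.sqrt n := by
  induction f with
  | zero =>
    intro lo hi n hlo hhi hsz
    have h1 : lo ≤ Nat.sqrt n := Nat.le_sqrt.mpr hlo
    have h2 : Nat.sqrt n < hi := Nat.sqrt_lt.mpr hhi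
    simp only [pvIsqrtGo]
    omega
  | succ f ih =>
    intro lo hi n hlo hhi hsz
    have h1 : lo ≤ Nat.sqrt n := Nat.le_sqrt.mpr hlo
    have h2 : Nat.sqrt n < hi := Nat.sqrt_lt.mpr hhi
    simp only [pvIsqrtGo]
    split
    · omega
    · next hgt =>
      by_cases hm : ((lo + hi) / 2) * ((lo + hi) / 2) ≤ n
      · rw [if_pos hm]
        exact ih _ _ _ hm hhi (by omega)
      · rw [if_neg hm]
        exact ih _ _ _ hlo (by omega) (by omega)

theorem pvIsqrt_eq (n : Nat) : pvIsqrt n = Nat.sqrt n := by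
  apply pvIsqrtGo_eq
  · omega
  · have h1 : n + 2 ≤ (n + 2) * (n + 2) := Nat.le_mul_of_pos_left _ (by omega)
    omega
  · omega

theorem pvIsqGo_eq (f : Nat) : ∀ (r n : Nat), r * r ≤ n → Nat.sqrt n ≤ r + f →
    pvIsqGo f r n = Nat.sqrt n := by
  induction f with
  | zero =>
    intro r n hr hb
    have h1 : r ≤ Nat.sqrt n := Nat.le_sqrt.mpr hr
    simp only [pvIsqGo]
    omega
  | succ f ih =>
    intro r n hr hb
    simp only [pvIsqGo]
    by_cases h : (r + 1) * (r + 1) ≤ n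
    · rw [if_pos h]
      exact ih _ _ h (by omega)
    · rw [if_neg h]
      have h1 : r ≤ Nat.sqrt n := Nat.le_sqrt.mpr hr
      have h2 : Nat.sqrt n < r + 1 := Nat.sqrt_lt.mpr (by omega)
      omega

theorem pvIsqrtB_eq (n : Int) : pvIsqrtB n = (Nat.sqrt n.toNat : Int) := by
  unfold pvIsqrtB
  congr 1
  apply pvIsqGo_eq
  · omega
  · have := Nat.sqrt_le_self n.toNat
    omega

-- A's trial division decides primality
theorem pv_no_small_div_iff (m : Nat) (hm : 2 ≤ m) :
    (∀ d : Nat, 2 ≤ d → d ≤ Nat.sqrt m → ¬ d ∣ m) ↔ Nat.Prime m := by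
  constructor
  · intro h
    by_contra hp
    have hpf := Nat.minFac_prime (by omega : m ≠ 1)
    have hsq : m.minFac ^ 2 ≤ m := Nat.minFac_sq_le_self (by omega) hp
    exact h m.minFac hpf.two_le (Nat.le_sqrt.mpr (by nlinarith [sq_nonneg m.minFac])) (Nat.minFac_dvd m)
  · intro hp d h2 hle hdvd
    rcases hp.eq_one_or_self_of_dvd d hdvd with h1 | h1
    · omega
    · have hs := Nat.sqrt_lt_self (show 1 < m by omega)
      omega

theorem pv_dvd_cast (n : Int) (h : 0 ≤ n) (d : Nat) : (d : Int) ∣ n ↔ d ∣ n.toNat := by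
  constructor
  · intro hd
    have : ((d : Nat) : Int) ∣ ((n.toNat : Nat) : Int) := by
      rwa [show ((n.toNat : Nat) : Int) = n by omega]
    exact_mod_cast this
  · intro hd
    have : ((d : Nat) : Int) ∣ ((n.toNat : Nat) : Int) := by exact_mod_cast hd
    rwa [show ((n.toNat : Nat) : Int) = n by omega] at this

-- a range(2, sqrt+1)-trial-division test decides primality (shared by A's is_prime
-- and B's small-prime table filter)
theorem pv_trial_iff (n : Int) (h2 : 2 ≤ n) :
    ((PySem.List.pyRange 2 ((Nat.sqrt n.toNat : Int) + 1) 1).all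
      (fun i => !(PySem.Int.mod n i == 0))) = true ↔ Nat.Prime n.toNat := by
  rw [← pv_no_small_div_iff n.toNat (by omega)]
  rw [List.all_eq_true]
  constructor
  · intro h d hd2 hdle hdvd
    have hmem : (d : Int) ∈ PySem.List.pyRange 2 ((Nat.sqrt n.toNat : Int) + 1) 1 := by
      rw [PySem.List.mem_pyRange_one]
      constructor
      · exact_mod_cast hd2
      · have : (d : Int) ≤ (Nat.sqrt n.toNat : Int) := by exact_mod_cast hdle
        omega
    have := h _ hmem
    simp only [Bool.not_eq_eq_eq_not, Bool.not_true, beq_eq_false_iff_ne, ne_eq] at this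
    apply this
    rw [PySem.Int.mod_eq_zero_iff_dvd]
    exact (pv_dvd_cast n (by omega) d).mpr hdvd
  · intro h i hi
    rw [PySem.List.mem_pyRange_one] at hi
    simp only [Bool.not_eq_eq_eq_not, Bool.not_true, beq_eq_false_iff_ne, ne_eq]
    intro hmod
    rw [PySem.Int.mod_eq_zero_iff_dvd] at hmod
    refine h i.toNat (by omega) (by omega) ?_
    have hi' : ((i.toNat : Nat) : Int) = i := by omega
    exact (pv_dvd_cast n (by omega) i.toNat).mp (by rwa [hi'])

theorem pv_primeA_iff (n : Int) (h2 : 2 ≤ n) :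
    pvIsPrimeA n = true ↔ Nat.Prime n.toNat := by
  rw [pvIsPrimeA, pvIsqrt_eq]
  exact pv_trial_iff n h2

theorem pv_smallPrime_iff (p : Int) (h2 : 2 ≤ p) :
    pvSmallPrime p = true ↔ Nat.Prime p.toNat := by
  rw [pvSmallPrime, pvIsqrtB_eq]
  exact pv_trial_iff p h2

-- the prime table: exactly the primes up to isqrt(b-1), in increasing order
theorem mem_pvPrimes (b p : Int) :
    p ∈ pvPrimes b ↔ 2 ≤ p ∧ p ≤ (Nat.sqrt (b - 1).toNat : Int) ∧ Nat.Prime p.toNat := by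
  rw [pvPrimes, pvIsqrtB_eq, List.mem_filter, PySem.List.mem_pyRange_one]
  constructor
  · rintro ⟨⟨h1, h2⟩, hf⟩
    exact ⟨h1, by omega, (pv_smallPrime_iff p h1).mp hf⟩
  · rintro ⟨h1, h2, hp⟩
    exact ⟨⟨h1, by omega⟩, (pv_smallPrime_iff p h1).mpr hp⟩

theorem pvPrimes_pairwise (b : Int) : (pvPrimes b).Pairwise (· ≤ ·) := by
  rw [pvPrimes]
  exact ((PySem.List.pairwise_lt_pyRange_one _ _).imp (fun h => le_of_lt h)).filter _

-- the break-at-p²>n loop over an increasing list of values ≥ 2 checks all of them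
theorem pvLoop_true_iff (n : Int) (L : List Int) (hpos : ∀ p ∈ L, 2 ≤ p)
    (hs : L.Pairwise (· ≤ ·)) :
    pvLoop n L = true ↔ ∀ p ∈ L, p * p ≤ n → ¬ PySem.Int.mod n p = 0 := by
  induction L with
  | nil =>
    constructor
    · intro _ p hp
      cases hp
    · intro _
      rfl
  | cons p ps ih =>
    rw [List.pairwise_cons] at hs
    have hp2 : 2 ≤ p := hpos p (by simp)
    simp only [pvLoop]
    by_cases hlt : n < p * p
    · rw [if_pos hlt]
      simp only [true_iff]
      intro q hq hqn
      rcases List.mem_cons.mp hq with rfl | hq'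
      · omega
      · have hpq : p ≤ q := hs.1 q hq'
        have hq2 : 2 ≤ q := hpos q hq
        nlinarith
    · rw [if_neg hlt]
      by_cases hmod : PySem.Int.mod n p == 0
      · rw [if_pos hmod]
        simp only [Bool.false_eq_true, false_iff]
        intro hall
        exact hall p (by simp) (by omega) (by simpa using hmod)
      · rw [if_neg hmod]
        rw [ih (fun q hq => hpos q (List.mem_cons_of_mem _ hq)) hs.2]
        constructor
        · intro h q hq hqn
          rcases List.mem_cons.mp hq with rfl | hq'
          · simpa using hmod
          · exact h q hq' hqn
        · intro h q hq hqn
          exact h q (List.mem_cons_of_mem _ hq) hqn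

-- against the table for b, the loop decides primality of any 2 ≤ n < b
theorem pvLoop_iff (b n : Int) (h2 : 2 ≤ n) (hlt : n < b) :
    pvLoop n (pvPrimes b) = true ↔ Nat.Prime n.toNat := by
  rw [pvLoop_true_iff n (pvPrimes b) (fun p hp => ((mem_pvPrimes b p).mp hp).1)
    (pvPrimes_pairwise b)]
  constructor
  · intro h
    by_contra hp
    have hpf := Nat.minFac_prime (show n.toNat ≠ 1 by omega)
    set q := n.toNat.minFac with hq
    have hqd : q ∣ n.toNat := Nat.minFac_dvd _
    have hsq : q ^ 2 ≤ n.toNat := Nat.minFac_sq_le_self (by omega) hp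
    have hq2 : 2 ≤ q := hpf.two_le
    have hqle : q ≤ Nat.sqrt (b - 1).toNat := by
      apply Nat.le_sqrt.mpr
      nlinarith [hsq, (by omega : n.toNat ≤ (b - 1).toNat)]
    have hmem : (q : Int) ∈ pvPrimes b := by
      rw [mem_pvPrimes]
      exact ⟨by exact_mod_cast hq2, by exact_mod_cast hqle, by simpa using hpf⟩
    apply h (q : Int) hmem
    · have : (q : Int) * q ≤ ((n.toNat : Nat) : Int) := by
        have : (q * q : Nat) ≤ n.toNat := by nlinarith [hsq]
        exact_mod_cast this
      omega
    · rw [PySem.Int.mod_eq_zero_iff_dvd]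
      exact (pv_dvd_cast n (by omega) q).mpr hqd
  · intro hp p hmem hpn hmod
    rw [mem_pvPrimes] at hmem
    rw [PySem.Int.mod_eq_zero_iff_dvd] at hmod
    have hpd : p.toNat ∣ n.toNat := by
      refine (pv_dvd_cast n (by omega) p.toNat).mp ?_
      rwa [show ((p.toNat : Nat) : Int) = p by omega]
    rcases hp.eq_one_or_self_of_dvd _ hpd with h1 | h1
    · omega
    · -- p = n with p*p ≤ n and p ≥ 2: impossible
      have hp2 : 2 ≤ p := hmem.1
      nlinarith [hpn, (by omega : p = n)]

-- the counted-node predicate of B's dfs (the b ≤ n prune folded in)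
def pvH (a b : Int) (primes : List Int) (n : Int) : Bool :=
  if b ≤ n then false else pvGood a primes n

-- the mathematical per-candidate predicate both programs count
def pvPredM (a b : Int) (n : Int) : Bool :=
  decide (a ≤ n) && decide (n < b) &&
    (PySem.Int.mod n 10 == 3 || PySem.Int.mod n 10 == 7) && decide (Nat.Prime n.toNat)

-- the candidate lists (as integers), level by level
def pvC : Nat → List Int
  | 0 => [0]
  | k + 1 => (pvC k).flatMap (fun c => ([2, 3, 5, 7] : List Int).map (fun d => 10 * c + d))

def pvCnt (a b : Int) (k : Nat) : Int := ((pvC k).countP (pvPredM a b) : Int)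

theorem mem_pvC_nonneg (k : Nat) (n : Int) (h : n ∈ pvC k) : 0 ≤ n := by
  induction k generalizing n with
  | zero => simp [pvC] at h; omega
  | succ k ih =>
    simp only [pvC, List.mem_flatMap, List.mem_map] at h
    obtain ⟨c, hc, d, hd, rfl⟩ := h
    have := ih c hc
    fin_cases hd <;> omega

theorem mem_pvC_ge2 (k : Nat) (n : Int) (h : n ∈ pvC (k + 1)) : 2 ≤ n := by
  simp only [pvC, List.mem_flatMap, List.mem_map] at h
  obtain ⟨c, hc, d, hd, rfl⟩ := h
  have := mem_pvC_nonneg k c hc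
  fin_cases hd <;> omega

theorem mem_pvC_ge22 (k : Nat) (n : Int) (h : n ∈ pvC (k + 2)) : 22 ≤ n := by
  have h' : n ∈ (pvC (k + 1)).flatMap (fun c => ([2, 3, 5, 7] : List Int).map (fun d => 10 * c + d)) := h
  simp only [List.mem_flatMap, List.mem_map] at h'
  obtain ⟨c, hc, d, hd, rfl⟩ := h'
  have := mem_pvC_ge2 k c hc
  fin_cases hd <;> omega

theorem mem_pvC_lt (k : Nat) (n : Int) (h : n ∈ pvC k) : n < 10 ^ k := by
  induction k generalizing n with
  | zero => simp [pvC] at h; omega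
  | succ k ih =>
    simp only [pvC, List.mem_flatMap, List.mem_map] at h
    obtain ⟨c, hc, d, hd, rfl⟩ := h
    have := ih c hc
    have : (10:Int) ^ (k+1) = 10 * 10 ^ k := by ring
    fin_cases hd <;> omega

theorem mem_pvC_mod10 (k : Nat) (n : Int) (h : n ∈ pvC (k + 1)) :
    PySem.Int.mod n 10 = 2 ∨ PySem.Int.mod n 10 = 3 ∨ PySem.Int.mod n 10 = 5 ∨ PySem.Int.mod n 10 = 7 := by
  simp only [pvC, List.mem_flatMap, List.mem_map] at h
  obtain ⟨c, hc, d, hd, rfl⟩ := h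
  rw [PySem.Int.mod_eq_emod_of_pos (by norm_num)]
  fin_cases hd
  · left; omega
  · right; left; omega
  · right; right; left; omega
  · right; right; right; omega

-- A's candidate strings are the decimal representations of the candidate integers
theorem pv_toChars_append_digit (n : Int) (hn : 2 ≤ n) (d : Nat) (hd10 : d < 10) :
    PySem.Int.toChars n ++ [Nat.digitChar d] = PySem.Int.toChars (10 * n + (d : Int)) := by
  unfold PySem.Int.toChars
  rw [if_neg (by omega), if_neg (by omega)]
  have h1 : (10 * n + (d : Int)).toNat = 10 * n.toNat + d := by omega
  rw [h1, ← Nat.toDigits_append_toDigits (by norm_num) (by omega) hd10,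
    Nat.toDigits_of_lt_base hd10]

theorem pvProd_eq (k : Nat) : pvProd (k + 1) = (pvC (k + 1)).map (fun n => PySem.Int.toChars n) := by
  induction k with
  | zero => decide
  | succ k ih =>
    show (pvProd (k + 1)).flatMap _ = ((pvC (k + 1)).flatMap _).map _
    rw [ih, List.flatMap_map, List.map_flatMap]
    refine List.flatMap_congr (fun n hn => ?_)
    have h2 : 2 ≤ n := mem_pvC_ge2 _ _ hn
    simp only [List.map_cons, List.map_nil]
    rw [show ('2' : Char) = Nat.digitChar 2 from by decide,
        show ('3' : Char) = Nat.digitChar 3 from by decide,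
        show ('5' : Char) = Nat.digitChar 5 from by decide,
        show ('7' : Char) = Nat.digitChar 7 from by decide]
    rw [pv_toChars_append_digit n h2 2 (by norm_num), pv_toChars_append_digit n h2 3 (by norm_num),
        pv_toChars_append_digit n h2 5 (by norm_num), pv_toChars_append_digit n h2 7 (by norm_num)]
    norm_num

-- parsing a decimal representation gives the number back
theorem pvDigitsInt_digitChar (d : Nat) (hd : d < 10) :
    pvDigitsInt [Nat.digitChar d] = (d : Int) := by
  interval_cases d <;> decide

theorem pvDigitsInt_toDigits (m : Nat) : pvDigitsInt (Nat.toDigits 10 m) = (m : Int) := by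
  induction m using Nat.strong_induction_on with
  | _ m ih =>
    by_cases h : m < 10
    · rw [Nat.toDigits_of_lt_base h, pvDigitsInt_digitChar m h]
    · have h10 : 10 * (m / 10) + m % 10 = m := by omega
      have hsplit : Nat.toDigits 10 m = Nat.toDigits 10 (m / 10) ++ Nat.toDigits 10 (m % 10) := by
        conv_lhs => rw [← h10]
        exact (Nat.toDigits_append_toDigits (by norm_num) (by omega) (by omega)).symm
      rw [hsplit, show Nat.toDigits 10 (m % 10) = [(m % 10).digitChar] from Nat.toDigits_of_lt_base (by omega)]
      unfold pvDigitsInt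
      rw [List.foldl_append]
      have hv := ih (m / 10) (by omega)
      unfold pvDigitsInt at hv
      rw [hv]
      simp only [List.foldl_cons, List.foldl_nil]
      have : ((Nat.digitChar (m % 10)).toNat : Int) - 48 = ((m % 10 : Nat) : Int) := by
        have : m % 10 < 10 := by omega
        interval_cases h : m % 10 <;> simp_all <;> decide
      rw [this]
      push_cast
      omega

-- string length of a non-negative int: len(str(a)) ≤ k  ↔  a < 10^k
theorem pv_len_le_iff (a : Int) (ha : 0 ≤ a) (k : Nat) (hk : 0 < k) :
    PySem.Str.len (PySem.Int.toStr a) ≤ (k : Int) ↔ a < 10 ^ k := by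
  rw [PySem.Str.len, PySem.Int.toList_toStr, PySem.Int.toChars, if_neg (by omega)]
  constructor
  · intro h
    have hlen : (Nat.toDigits 10 a.toNat).length ≤ k := by exact_mod_cast h
    have := (Nat.length_toDigits_le_iff (by norm_num) hk).mp hlen
    have hcast : ((10 ^ k : Nat) : Int) = 10 ^ k := by push_cast; ring
    omega
  · intro h
    have : a.toNat < 10 ^ k := by
      have hcast : ((10 ^ k : Nat) : Int) = 10 ^ k := by push_cast; ring
      omega
    have := (Nat.length_toDigits_le_iff (b := 10) (by norm_num) hk).mpr this
    exact_mod_cast this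

theorem pv_len_pos (a : Int) : 1 ≤ PySem.Str.len (PySem.Int.toStr a) := by
  rw [PySem.Str.len, PySem.Int.toList_toStr, PySem.Int.toChars]
  split
  · simp
  · exact_mod_cast Nat.length_toDigits_pos

-- A's counted predicate on candidate strings
def pvPA (a b : Int) (j : List Char) : Bool :=
  !decide (PySem.Int.mod (pvDigitsInt j) 10 = 2 ∨ PySem.Int.mod (pvDigitsInt j) 10 = 5 ∨
      pvDigitsInt j < a ∨ b ≤ pvDigitsInt j) && pvIsPrimeA (pvDigitsInt j)

theorem pv_foldl_inner (a b : Int) (l : List (List Char)) (t : Int) :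
    l.foldl (fun total j =>
        let prime := pvDigitsInt j
        if PySem.Int.mod prime 10 = 2 ∨ PySem.Int.mod prime 10 = 5 ∨ prime < a ∨ b ≤ prime
        then total
        else if pvIsPrimeA prime then total + 1 else total) t
      = t + ((l.countP (pvPA a b)) : Int) := by
  have hfun : (fun (total : Int) (j : List Char) =>
      let prime := pvDigitsInt j
      if PySem.Int.mod prime 10 = 2 ∨ PySem.Int.mod prime 10 = 5 ∨ prime < a ∨ b ≤ prime
      then total
      else if pvIsPrimeA prime then total + 1 else total)
      = fun (total : Int) (j : List Char) => if pvPA a b j = true then total + 1 else total := by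
    funext t' j
    simp only [pvPA, Bool.and_eq_true, Bool.not_eq_true', decide_eq_false_iff_not]
    have hmodeq : PySem.Int.mod (pvDigitsInt j) 10 = pvDigitsInt j % 10 :=
      PySem.Int.mod_eq_emod_of_pos (by norm_num)
    rw [hmodeq]
    by_cases hc : pvDigitsInt j % 10 = 2 ∨ pvDigitsInt j % 10 = 5 ∨
        pvDigitsInt j < a ∨ b ≤ pvDigitsInt j
    · simp [hc]
    · by_cases hp : pvIsPrimeA (pvDigitsInt j) = true <;> simp [hc, hp]
  rw [hfun, PySem.List.foldl_count_if]

-- A as an initial total plus per-length counts over its candidate strings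
theorem pvA_eq (a b : Int) :
    get_total_primes a b =
      (if 5 < a then 0 else if 2 < a then 1 else 2) +
        ((PySem.List.pyRange (PySem.Str.len (PySem.Int.toStr a))
            (PySem.Str.len (PySem.Int.toStr b) + 1) 1).map
          (fun i => ((pvProd i.toNat).countP (pvPA a b) : Int))).sum := by
  simp only [get_total_primes]
  have h1 : (fun (total : Int) (i : Int) =>
      (pvProd i.toNat).foldl
        (fun total j =>
          let prime := pvDigitsInt j
          if PySem.Int.mod prime 10 = 2 ∨ PySem.Int.mod prime 10 = 5 ∨ prime < a ∨ b ≤ prime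
          then total
          else if pvIsPrimeA prime then total + 1 else total) total)
      = fun (total : Int) (i : Int) => total + ((pvProd i.toNat).countP (pvPA a b) : Int) := by
    funext t i
    exact pv_foldl_inner a b _ t
  rw [h1, PySem.List.foldl_add]

-- on candidates of positive length, A's count is the count of pvPredM
theorem pv_countP_eq (a b : Int) (k : Nat) :
    ((pvProd (k + 1)).countP (pvPA a b) : Int) = pvCnt a b (k + 1) := by
  rw [pvProd_eq, List.countP_map, pvCnt]
  congr 1
  apply List.countP_congr
  intro n hn
  have h2 := mem_pvC_ge2 _ _ hn
  have hmod := mem_pvC_mod10 _ _ hn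
  have hval : pvDigitsInt (PySem.Int.toChars n) = n := by
    rw [PySem.Int.toChars, if_neg (by omega), pvDigitsInt_toDigits]; omega
  have hmodeq : PySem.Int.mod n 10 = n % 10 := PySem.Int.mod_eq_emod_of_pos (by norm_num)
  rw [hmodeq] at hmod
  have hA : pvIsPrimeA n = decide (Nat.Prime n.toNat) := by
    by_cases hp : Nat.Prime n.toNat
    · simp [hp, (pv_primeA_iff n h2).mpr hp]
    · simp only [hp, decide_false]
      rw [Bool.eq_false_iff]
      intro hc
      exact hp ((pv_primeA_iff n h2).mp hc)
  show pvPA a b (PySem.Int.toChars n) = true ↔ pvPredM a b n = true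
  simp only [pvPA, pvPredM, hval, Bool.and_eq_true, Bool.not_eq_true',
    decide_eq_false_iff_not, decide_eq_true_eq, Bool.or_eq_true, beq_iff_eq, not_or, not_lt,
    hA]
  rcases hmod with h | h | h | h <;> simp [h]

-- ===== B's dfs as a per-level count =====

-- extensions of a prefix c by exactly k more prime digits, in DFS order
def pvExt : Nat → Int → List Int
  | 0, c => [c]
  | k + 1, c => ([2, 3, 5, 7] : List Int).flatMap (fun d => pvExt k (10 * c + d))

theorem mem_pvExt_ge (k : Nat) : ∀ (c n : Int), 1 ≤ c → n ∈ pvExt k c → c ≤ n := by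
  induction k with
  | zero => intro c n _ h; simp [pvExt] at h; omega
  | succ k ih =>
    intro c n hc h
    simp only [pvExt, List.mem_flatMap] at h
    obtain ⟨d, hd, hn⟩ := h
    have hd' : 2 ≤ d ∧ d ≤ 7 := by fin_cases hd <;> norm_num
    have := ih (10 * c + d) n (by omega) hn
    omega

theorem pvExt_succ_flat (k : Nat) : ∀ (c : Int),
    pvExt (k + 1) c = (pvExt k c).flatMap (fun x => [10 * x + 2, 10 * x + 3, 10 * x + 5, 10 * x + 7]) := by
  induction k with
  | zero => intro c; simp [pvExt]
  | succ k ih =>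
    intro c
    show ([2,3,5,7] : List Int).flatMap (fun d => pvExt (k + 1) (10 * c + d)) = _
    rw [show (fun d => pvExt (k + 1) (10 * c + d))
        = (fun d => (pvExt k (10 * c + d)).flatMap
            (fun x => [10 * x + 2, 10 * x + 3, 10 * x + 5, 10 * x + 7])) from
      funext (fun d => ih _)]
    rw [show pvExt (k + 1) c = ([2,3,5,7] : List Int).flatMap (fun d => pvExt k (10 * c + d)) from rfl]
    rw [List.flatMap_assoc]

theorem pvC_eq_ext (k : Nat) : pvC k = pvExt k 0 := by
  induction k with
  | zero => rfl
  | succ k ih =>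
    rw [show pvC (k+1) = (pvC k).flatMap (fun c => ([2,3,5,7] : List Int).map (fun d => 10 * c + d)) from rfl,
      ih, pvExt_succ_flat]
    refine List.flatMap_congr (fun c _ => ?_)
    norm_num

-- B's dfs computes the pvH-count of all extensions of c below the prune line
theorem pv_dfs_sum (a b : Int) (P : List Int) (K : Nat) :
    ∀ (f : Nat) (c : Int), 1 ≤ c → b ≤ 10 ^ K * c → (b - c).toNat < f →
    pvDfs a b P f c =
      ((List.range K).map (fun k => ((pvExt k c).countP (pvH a b P) : Int))).sum := by
  induction K with
  | zero =>
    intro f c hc hb hf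
    obtain ⟨f', rfl⟩ : ∃ f', f = f' + 1 := ⟨f - 1, by omega⟩
    simp only [pvDfs, List.range_zero, List.map_nil, List.sum_nil]
    rw [if_pos (by simpa using hb)]
  | succ K ih =>
    intro f c hc hb hf
    obtain ⟨f', rfl⟩ : ∃ f', f = f' + 1 := ⟨f - 1, by omega⟩
    simp only [pvDfs]
    by_cases hbc : b ≤ c
    · rw [if_pos hbc]
      symm
      apply List.sum_eq_zero
      intro x hx
      rw [List.mem_map] at hx
      obtain ⟨k, _, rfl⟩ := hx
      have : (pvExt k c).countP (pvH a b P) = 0 := by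
        rw [List.countP_eq_zero]
        intro n hn
        have := mem_pvExt_ge k c n hc hn
        simp [pvH, show b ≤ n by omega]
      simp [this]
    · rw [if_neg hbc]
      have hpow : (0:Int) < 10 ^ K := by positivity
      have hchild : ∀ d : Int, 2 ≤ d → d ≤ 7 →
          pvDfs a b P f' (10 * c + d) =
            ((List.range K).map (fun k => ((pvExt k (10 * c + d)).countP (pvH a b P) : Int))).sum := by
        intro d hd2 hd7
        apply ih
        · omega
        · have : (10:Int) ^ (K + 1) * c = 10 ^ K * (10 * c) := by ring
          nlinarith
        · omega
      rw [hchild 2 (by norm_num) (by norm_num), hchild 3 (by norm_num) (by norm_num),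
          hchild 5 (by norm_num) (by norm_num), hchild 7 (by norm_num) (by norm_num)]
      rw [List.range_succ_eq_map, List.map_cons, List.sum_cons, List.map_map]
      have h0 : ((pvExt 0 c).countP (pvH a b P) : Int) = if pvGood a P c then 1 else 0 := by
        have hH : pvH a b P c = pvGood a P c := by rw [pvH, if_neg hbc]
        by_cases h : pvGood a P c = true <;> simp [pvExt, hH, h]
      have hterm : ∀ k : Nat,
          ((pvExt (k+1) c).countP (pvH a b P) : Int) =
            ((pvExt k (10*c+2)).countP (pvH a b P) : Int) +
            ((pvExt k (10*c+3)).countP (pvH a b P) : Int) +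
            ((pvExt k (10*c+5)).countP (pvH a b P) : Int) +
            ((pvExt k (10*c+7)).countP (pvH a b P) : Int) := by
        intro k
        have : pvExt (k+1) c = pvExt k (10*c+2) ++ (pvExt k (10*c+3) ++ (pvExt k (10*c+5) ++ pvExt k (10*c+7))) := by
          simp [pvExt, List.flatMap]
        rw [this]
        simp only [List.countP_append]
        push_cast
        ring
      have hmap : (List.range K).map ((fun k => ((pvExt k c).countP (pvH a b P) : Int)) ∘ Nat.succ)
          = (List.range K).map (fun k =>
              ((pvExt k (10*c+2)).countP (pvH a b P) : Int) +
              (((pvExt k (10*c+3)).countP (pvH a b P) : Int) +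
               (((pvExt k (10*c+5)).countP (pvH a b P) : Int) +
                ((pvExt k (10*c+7)).countP (pvH a b P) : Int)))) := by
        refine List.map_congr_left (fun k _ => ?_)
        simp only [Function.comp_apply, Nat.succ_eq_add_one, hterm k]
        ring
      rw [hmap]
      rw [PySem.List.sum_map_add_int, PySem.List.sum_map_add_int, PySem.List.sum_map_add_int]
      rw [h0]
      ring

-- the k=0 level [2,3,5,7]: B counts 2 and 5 here by the range test, 3 and 7 as pvPredM
theorem pv_H_small (a b : Int) (n : Int) (h2 : 2 ≤ n) (hn : n = 2 ∨ n = 3 ∨ n = 5 ∨ n = 7) :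
    pvH a b (pvPrimes b) n = (decide (a ≤ n) && decide (n < b)) := by
  have hprime : Nat.Prime n.toNat := by rcases hn with rfl | rfl | rfl | rfl <;> decide
  have hdig : (n = 2 ∨ n = 5 ∨ PySem.Int.mod n 10 = 3 ∨ PySem.Int.mod n 10 = 7) := by
    rcases hn with rfl | rfl | rfl | rfl
    · left; rfl
    · right; right; left; decide
    · right; left; rfl
    · right; right; right; decide
  rw [pvH, pvGood]
  by_cases hb : b ≤ n
  · rw [if_pos hb]
    simp [show ¬ n < b by omega]
  · rw [if_neg hb]
    by_cases ha : n < a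
    · rw [if_pos (by left; exact ha)]
      simp [show ¬ a ≤ n by omega]
    · rw [if_neg (by push_neg; exact ⟨by omega, hdig⟩)]
      rw [(pvLoop_iff b n h2 (by omega)).mpr hprime]
      simp [show a ≤ n by omega, show n < b by omega]

theorem pv_level1 (a b : Int) :
    (((pvC 1).countP (pvH a b (pvPrimes b))) : Int) =
      ((if a ≤ 2 ∧ 2 < b then (1:Int) else 0) + (if a ≤ 5 ∧ 5 < b then 1 else 0))
        + pvCnt a b 1 := by
  have hC1 : pvC 1 = [2, 3, 5, 7] := by decide
  have h2 := pv_H_small a b 2 (by norm_num) (by norm_num)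
  have h3 := pv_H_small a b 3 (by norm_num) (by norm_num)
  have h5 := pv_H_small a b 5 (by norm_num) (by norm_num)
  have h7 := pv_H_small a b 7 (by norm_num) (by norm_num)
  have hpr3 : Nat.Prime 3 := by norm_num
  have hpr7 : Nat.Prime 7 := by norm_num
  have hp2 : pvPredM a b 2 = false := by
    simp [pvPredM]
  have hp5 : pvPredM a b 5 = false := by
    simp [pvPredM]
  have hp3 : pvPredM a b 3 = (decide (a ≤ 3) && decide (3 < b)) := by
    simp [pvPredM, hpr3]
  have hp7 : pvPredM a b 7 = (decide (a ≤ 7) && decide (7 < b)) := by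
    simp [pvPredM, hpr7]
  rw [pvCnt, hC1]
  simp only [List.countP_cons, List.countP_nil, h2, h3, h5, h7, hp2, hp3, hp5, hp7,
    Bool.and_eq_true, decide_eq_true_eq, Nat.zero_add]
  push_cast [apply_ite (fun n : Nat => (n : Int))]
  split_ifs <;> norm_num

-- higher levels: every candidate is ≥ 22, so B's node test is exactly pvPredM
theorem pv_level_high (a b : Int) (k : Nat) :
    (((pvC (k + 2)).countP (pvH a b (pvPrimes b))) : Int) = pvCnt a b (k + 2) := by
  rw [pvCnt]
  congr 1
  apply List.countP_congr
  intro n hn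
  have h22 := mem_pvC_ge22 _ _ hn
  have hmod := mem_pvC_mod10 _ _ hn
  show pvH a b (pvPrimes b) n = true ↔ pvPredM a b n = true
  rw [pvH, pvGood, pvPredM]
  by_cases hb : b ≤ n
  · rw [if_pos hb]
    simp [show ¬ n < b by omega]
  · rw [if_neg hb]
    by_cases hd : PySem.Int.mod n 10 = 3 ∨ PySem.Int.mod n 10 = 7
    · by_cases ha : n < a
      · rw [if_pos (by left; exact ha)]
        simp [show ¬ a ≤ n by omega]
      · rw [if_neg (by
          push_neg
          refine ⟨by omega, ?_⟩
          rcases hd with h | h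
          · right; right; left; exact h
          · right; right; right; exact h)]
        have hloop := pvLoop_iff b n (by omega) (by omega)
        simp only [Bool.and_eq_true, decide_eq_true_eq, Bool.or_eq_true, beq_iff_eq]
        constructor
        · intro h
          exact ⟨⟨⟨by omega, by omega⟩, hd⟩, hloop.mp h⟩
        · intro h
          exact hloop.mpr h.2
    · rw [if_pos (by
        right
        push_neg
        exact ⟨by omega, by omega, fun h => hd (Or.inl h), fun h => hd (Or.inr h)⟩)]
      simp only [Bool.and_eq_true, decide_eq_true_eq, Bool.or_eq_true, beq_iff_eq]
      constructor
      · intro h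
        exact absurd h (by simp)
      · rintro ⟨⟨_, h⟩, _⟩
        exact absurd h hd

-- B as the direct {2,5} count plus the same per-length counts
theorem pvB_eq (a b : Int) :
    get_total_primes_alt a b =
      ((if a ≤ 2 ∧ 2 < b then (1:Int) else 0) + (if a ≤ 5 ∧ 5 < b then 1 else 0)) +
        ((List.range (PySem.Str.len (PySem.Int.toStr b)).toNat).map
          (fun k => pvCnt a b (k + 1))).sum := by
  have hLb := pv_len_pos b
  set K := (PySem.Str.len (PySem.Int.toStr b)).toNat with hKdef
  clear_value K
  have hK1 : 1 ≤ K := by omega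
  have hpowpos : (0:Int) < 10 ^ K := by positivity
  have hbK : b ≤ 10 ^ K := by
    by_cases hb1 : 1 ≤ b
    · have hlen : PySem.Str.len (PySem.Int.toStr b) ≤ (K : Int) := by omega
      have := (pv_len_le_iff b (by omega) K (by omega)).mp hlen
      omega
    · omega
  have hdfs : ∀ d : Int, 2 ≤ d → d ≤ 7 →
      pvDfs a b (pvPrimes b) (b.toNat + 1) d =
        ((List.range K).map (fun k => ((pvExt k d).countP (pvH a b (pvPrimes b)) : Int))).sum := by
    intro d hd2 hd7
    apply pv_dfs_sum
    · omega
    · nlinarith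
    · omega
  show pvDfs a b (pvPrimes b) (b.toNat + 1) 2 + pvDfs a b (pvPrimes b) (b.toNat + 1) 3 +
      pvDfs a b (pvPrimes b) (b.toNat + 1) 5 + pvDfs a b (pvPrimes b) (b.toNat + 1) 7 = _
  rw [hdfs 2 (by norm_num) (by norm_num), hdfs 3 (by norm_num) (by norm_num),
      hdfs 5 (by norm_num) (by norm_num), hdfs 7 (by norm_num) (by norm_num)]
  rw [← PySem.List.sum_map_add_int, ← PySem.List.sum_map_add_int, ← PySem.List.sum_map_add_int]
  have hlevel : ∀ k ∈ List.range K,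
      ((((pvExt k 2).countP (pvH a b (pvPrimes b)) : Int) +
        ((pvExt k 3).countP (pvH a b (pvPrimes b)) : Int)) +
        ((pvExt k 5).countP (pvH a b (pvPrimes b)) : Int)) +
        ((pvExt k 7).countP (pvH a b (pvPrimes b)) : Int)
      = (((pvC (k + 1)).countP (pvH a b (pvPrimes b))) : Int) := by
    intro k _
    rw [pvC_eq_ext]
    have hflat : pvExt (k + 1) 0 =
        pvExt k 2 ++ (pvExt k 3 ++ (pvExt k 5 ++ pvExt k 7)) := by
      show ([2,3,5,7] : List Int).flatMap (fun d => pvExt k (10 * 0 + d)) = _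
      norm_num [List.flatMap]
    rw [hflat]
    simp only [List.countP_append]
    push_cast
    ring
  rw [List.map_congr_left hlevel]
  obtain ⟨K', rfl⟩ : ∃ K', K = K' + 1 := ⟨K - 1, by omega⟩
  rw [List.range_succ_eq_map, List.map_cons, List.sum_cons, List.map_map,
      List.map_cons, List.sum_cons, List.map_map]
  simp only [Nat.zero_add]
  have hmapz : (List.range K').map
      ((fun k => (((pvC (k + 1)).countP (pvH a b (pvPrimes b))) : Int)) ∘ Nat.succ)
      = (List.range K').map ((fun k => pvCnt a b (k + 1)) ∘ Nat.succ) := by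
    refine List.map_congr_left (fun k _ => ?_)
    simp only [Function.comp_apply, Nat.succ_eq_add_one]
    exact pv_level_high a b k
  rw [hmapz, pv_level1]
  ring

-- lengths shorter than len(str(a)) contribute nothing: their candidates are below a
theorem pv_cnt_zero (a b : Int) (ha : 0 ≤ a) (k : Nat) (hk : 0 < k)
    (hlt : (k : Int) < PySem.Str.len (PySem.Int.toStr a)) : pvCnt a b k = 0 := by
  rw [pvCnt]
  have h10 : 10 ^ k ≤ a := by
    by_contra hh
    have hh' : a < 10 ^ k := by omega
    have := (pv_len_le_iff a ha k hk).mpr hh'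
    omega
  have : (pvC k).countP (pvPredM a b) = 0 := by
    rw [List.countP_eq_zero]
    intro n hn
    have hlt' := mem_pvC_lt k n hn
    simp only [pvPredM, Bool.and_eq_true, decide_eq_true_eq, not_and]
    intro h1
    omega
  rw [this]
  rfl

-- A's fixed initial total equals B's direct {2,5} count (outside D_, inside Pre_)
theorem pv_init_eq (a b : Int) (ha : 0 ≤ a) (hb : 0 ≤ b)
    (hD : ¬ (0 ≤ a ∧ a ≤ 5 ∧ 0 ≤ b ∧ b ≤ 5)) :
    (if 5 < a then (0 : Int) else if 2 < a then 1 else 2) =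
      (if a ≤ 2 ∧ 2 < b then (1:Int) else 0) + (if a ≤ 5 ∧ 5 < b then 1 else 0) := by
  have h6 : 6 ≤ a ∨ 6 ≤ b := by omega
  split_ifs <;> omega

theorem pv_main (a b : Int) (ha : 0 ≤ a) (hb : 0 ≤ b)
    (hD : ¬ (0 ≤ a ∧ a ≤ 5 ∧ 0 ≤ b ∧ b ≤ 5)) :
    get_total_primes a b = get_total_primes_alt a b := by
  rw [pvA_eq, pvB_eq, ← pv_init_eq a b ha hb hD]
  congr 1
  have hLa := pv_len_pos a
  have hLb := pv_len_pos b
  set La : Int := PySem.Str.len (PySem.Int.toStr a) with hLadef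
  set Lb : Int := PySem.Str.len (PySem.Int.toStr b) with hLbdef
  have hmapA : (PySem.List.pyRange La (Lb + 1) 1).map
      (fun i => ((pvProd i.toNat).countP (pvPA a b) : Int))
      = (PySem.List.pyRange La (Lb + 1) 1).map (fun i => pvCnt a b i.toNat) := by
    apply List.map_congr_left
    intro i hi
    rw [PySem.List.mem_pyRange_one] at hi
    have h1 : 1 ≤ i := by omega
    obtain ⟨k, hk⟩ : ∃ k, i.toNat = k + 1 := ⟨i.toNat - 1, by omega⟩
    rw [hk, pv_countP_eq]
  rw [hmapA]
  have hmapB : ((List.range Lb.toNat).map (fun k => pvCnt a b (k + 1))).sum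
      = ((PySem.List.pyRange 1 (Lb + 1) 1).map (fun i => pvCnt a b i.toNat)).sum := by
    rw [PySem.List.pyRange_one]
    rw [show ((Lb + 1) - 1).toNat = Lb.toNat from by omega]
    rw [List.map_map]
    congr 1
    apply List.map_congr_left
    intro k _
    show pvCnt a b (k + 1) = pvCnt a b (1 + (k : Int)).toNat
    rw [show ((1 : Int) + (k : Int)).toNat = k + 1 from by omega]
  rw [hmapB]
  by_cases hcase : La ≤ Lb + 1
  · rw [PySem.List.pyRange_one_append 1 La (Lb + 1) hLa hcase, List.map_append, List.sum_append]
    have hzero : ((PySem.List.pyRange 1 La 1).map (fun i => pvCnt a b i.toNat)).sum = 0 := by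
      apply List.sum_eq_zero
      intro x hx
      rw [List.mem_map] at hx
      obtain ⟨i, hi, rfl⟩ := hx
      rw [PySem.List.mem_pyRange_one] at hi
      exact pv_cnt_zero a b ha i.toNat (by omega) (by rw [← hLadef]; omega)
    rw [hzero]
    ring
  · rw [PySem.List.pyRange_one_eq_nil (by omega), List.map_nil, List.sum_nil]
    symm
    apply List.sum_eq_zero
    intro x hx
    rw [List.mem_map] at hx
    obtain ⟨i, hi, rfl⟩ := hx
    rw [PySem.List.mem_pyRange_one] at hi
    exact pv_cnt_zero a b ha i.toNat (by omega) (by rw [← hLadef]; omega)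

-- with a non-positive upper bound nothing is counted at any level
theorem pv_cnt_negb (a b : Int) (hb : b ≤ 0) (k : Nat) : pvCnt a b k = 0 := by
  rw [pvCnt]
  have : (pvC k).countP (pvPredM a b) = 0 := by
    rw [List.countP_eq_zero]
    intro n hn
    have hnn := mem_pvC_nonneg k n hn
    simp only [pvPredM, Bool.and_eq_true, decide_eq_true_eq, not_and]
    intro h1
    omega
  rw [this]
  rfl

-- with a non-positive upper bound A returns exactly its fixed initial total
theorem pv_A_negb (a b : Int) (ha : 0 ≤ a) (hb : b ≤ 0) :
    get_total_primes a b = (if 5 < a then 0 else if 2 < a then 1 else 2) := by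
  rw [pvA_eq]
  have hzero : ((PySem.List.pyRange (PySem.Str.len (PySem.Int.toStr a))
      (PySem.Str.len (PySem.Int.toStr b) + 1) 1).map
      (fun i => ((pvProd i.toNat).countP (pvPA a b) : Int))).sum = 0 := by
    apply List.sum_eq_zero
    intro x hx
    rw [List.mem_map] at hx
    obtain ⟨i, hi, rfl⟩ := hx
    rw [PySem.List.mem_pyRange_one] at hi
    have hLa := pv_len_pos a
    obtain ⟨k, hk⟩ : ∃ k, i.toNat = k + 1 := ⟨i.toNat - 1, by omega⟩
    rw [hk, pv_countP_eq, pv_cnt_negb a b hb]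
  rw [hzero]
  ring

-- with a non-positive upper bound B counts nothing
theorem pv_B_negb (a b : Int) (hb : b ≤ 0) : get_total_primes_alt a b = 0 := by
  rw [pvB_eq]
  have hsum : ((List.range (PySem.Str.len (PySem.Int.toStr b)).toNat).map
      (fun k => pvCnt a b (k + 1))).sum = 0 := by
    apply List.sum_eq_zero
    intro x hx
    rw [List.mem_map] at hx
    obtain ⟨k, _, rfl⟩ := hx
    exact pv_cnt_negb a b hb (k + 1)
  rw [hsum]
  rw [if_neg (by omega), if_neg (by omega)]
  ring

-- the two equivalence cases combined over the whole claimed region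
theorem pv_main' (a b : Int) (ha : 0 ≤ a) (hD : ¬ (0 ≤ a ∧ a ≤ 5 ∧ b ≤ 5)) :
    get_total_primes a b = get_total_primes_alt a b := by
  by_cases hb : 0 ≤ b
  · exact pv_main a b ha hb (fun hc => hD ⟨hc.1, hc.2.1, hc.2.2.2⟩)
  · have ha6 : 6 ≤ a := by
      by_contra hc
      exact hD ⟨ha, by omega, by omega⟩
    rw [pv_A_negb a b ha (by omega), pv_B_negb a b (by omega)]
    rw [if_pos (by omega)]

-- ===== VERDICT (by name: the statement is the Claim_ definition above) =====
theorem get_total_primes_spec : Claim_unchanged_get_total_primes := by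
  intro a b _ hPre
  unfold Spec_get_total_primes
  intro hD
  unfold Pre_get_total_primes at hPre
  unfold D_get_total_primes at hD
  exact pv_main' a b hPre hD
theorem get_total_primes_changed : Claim_changed_get_total_primes := by
  unfold Claim_changed_get_total_primes; decide
theorem get_total_primes_tight : Claim_exact_get_total_primes := by
  intro a b _ _ hD
  unfold D_get_total_primes at hD
  obtain ⟨h1, h2, h3⟩ := hD
  by_cases hb0 : 0 ≤ b
  · interval_cases a <;> interval_cases b <;> decide
  · rw [pv_A_negb a b h1 (by omega), pv_B_negb a b (by omega)]
    split_ifs <;> omega
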